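-- pv_equiv track=rewrite | github.com/grafana/oncall | engine/common/insight_log/entity_insight_logs.py | _state_diff_finder
-- ===== SOURCE A (Python) =====
-- def _state_diff_finder(before: dict, after: dict):
--     before_diff = {}
--     after_diff = {}
--     for k, v in before.items():
--         if k not in after:
--             before_diff[k] = v
--             continue
--         if after[k] != v:
--             before_diff[k] = before[k]
--             after_diff[k] = after[k]
--     for k, v in after.items():
--         if k not in before:
--             after_diff[k] = v
--     return before_diff, after_diff
-- ===== SOURCE B (Python) =====
-- def _state_diff_finder(before: dict, after: dict):
--     before_diff = {}
--     after_diff = {}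
--     for k in {**before, **after}:
--         if k not in after:
--             before_diff[k] = before[k]
--         elif k not in before:
--             after_diff[k] = after[k]
--         elif before[k] != after[k]:
--             before_diff[k] = before[k]
--             after_diff[k] = after[k]
--     return before_diff, after_diff
-- ===== Notes on version B (the rewrite author's own statement) =====
-- stated objective: simpler
-- what changed: Instead of A's two separate scans (over before with two mutation sites, then over after), B builds the key union {**before, **after} once and classifies each key in a single loop with one three-way branch.
import Mathlib
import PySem

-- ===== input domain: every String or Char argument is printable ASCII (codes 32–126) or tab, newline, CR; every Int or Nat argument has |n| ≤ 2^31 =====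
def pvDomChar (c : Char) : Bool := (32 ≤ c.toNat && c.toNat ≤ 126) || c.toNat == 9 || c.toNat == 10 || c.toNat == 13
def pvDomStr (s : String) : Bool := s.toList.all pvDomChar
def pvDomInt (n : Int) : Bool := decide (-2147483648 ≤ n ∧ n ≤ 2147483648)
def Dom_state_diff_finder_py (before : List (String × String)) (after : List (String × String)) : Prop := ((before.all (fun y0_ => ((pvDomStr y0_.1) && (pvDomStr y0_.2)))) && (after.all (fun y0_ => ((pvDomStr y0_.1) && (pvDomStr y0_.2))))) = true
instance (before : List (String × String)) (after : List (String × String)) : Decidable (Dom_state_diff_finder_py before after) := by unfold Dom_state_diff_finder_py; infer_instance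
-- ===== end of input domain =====

-- B replaces A's two separate scans by one loop over the merged key set {**before, **after}
-- with a single three-way classification per key (objective: simpler decomposition).

-- ===== PORT A =====
def state_diff_finder_py (before : List (String × String)) (after : List (String × String)) : (List (String × String)) × (List (String × String)) :=
  let bD : PySem.Dict String String := PySem.Dict.mk before
  let aD : PySem.Dict String String := PySem.Dict.mk after
  -- first loop: for k, v in before.items()
  let p := before.foldl
    (fun (p : PySem.Dict String String × PySem.Dict String String) kv =>
      if aD.contains kv.1 = false then (p.1.insert kv.1 kv.2, p.2)      -- k not in after
      else if aD.getD kv.1 kv.2 ≠ kv.2 then                             -- after[k] != v  (k in after, so the default is never used)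
        (p.1.insert kv.1 (bD.getD kv.1 kv.2), p.2.insert kv.1 (aD.getD kv.1 kv.2))
      else p)
    (PySem.Dict.mk [], PySem.Dict.mk [])
  -- second loop: for k, v in after.items()
  let ad := after.foldl
    (fun (ad : PySem.Dict String String) kv =>
      if bD.contains kv.1 = false then ad.insert kv.1 kv.2 else ad)
    p.2
  (p.1.items, ad.items)

-- ===== PORT B =====
def state_diff_finder_py_alt (before : List (String × String)) (after : List (String × String)) : (List (String × String)) × (List (String × String)) :=
  let bD : PySem.Dict String String := PySem.Dict.mk before
  let aD : PySem.Dict String String := PySem.Dict.mk after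
  -- {**before, **after}
  let merged := after.foldl (fun (d : PySem.Dict String String) kv => d.insert kv.1 kv.2) bD
  -- one loop over the merged keys with a three-way branch (before[k]/after[k] are guarded, defaults never used)
  let p := merged.keys.foldl
    (fun (p : PySem.Dict String String × PySem.Dict String String) k =>
      if aD.contains k = false then (p.1.insert k (bD.getD k ""), p.2)                -- k not in after
      else if bD.contains k = false then (p.1, p.2.insert k (aD.getD k ""))           -- k not in before
      else if bD.getD k "" ≠ aD.getD k "" then                                        -- before[k] != after[k]
        (p.1.insert k (bD.getD k ""), p.2.insert k (aD.getD k ""))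
      else p)
    (PySem.Dict.mk [], PySem.Dict.mk [])
  (p.1.items, p.2.items)

-- ===== PRECONDITION & SPEC =====
-- Pre_ excludes association lists with duplicate keys: they do not represent a Python dict
-- (A's arguments are dicts, whose items always have distinct keys), so nothing is claimed there.
def Pre_state_diff_finder_py (before : List (String × String)) (after : List (String × String)) : Prop :=
  (before.map Prod.fst).Nodup ∧ (after.map Prod.fst).Nodup
instance (before : List (String × String)) (after : List (String × String)) : Decidable (Pre_state_diff_finder_py before after) := by unfold Pre_state_diff_finder_py; infer_instance

def pvWitness_state_diff_finder_py : (List (String × String)) × (List (String × String)) :=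
  ([("a", "1"), ("b", "2"), ("c", "3")], [("b", "2"), ("c", "9"), ("d", "4")])

def Spec_state_diff_finder_py (before : List (String × String)) (after : List (String × String)) (out : (List (String × String)) × (List (String × String))) : Prop := out = state_diff_finder_py_alt before after
instance (before : List (String × String)) (after : List (String × String)) (out : (List (String × String)) × (List (String × String))) : Decidable (Spec_state_diff_finder_py before after out) := by unfold Spec_state_diff_finder_py; infer_instance

-- ===== CLAIM (what is proved, stated in full; the proofs are below) =====
def Claim_equal_state_diff_finder_py : Prop := ∀ (before : List (String × String)) (after : List (String × String)), Dom_state_diff_finder_py before after → Pre_state_diff_finder_py before after → Spec_state_diff_finder_py before after (state_diff_finder_py before after)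

-- ===== LEMMAS AND PROOFS =====

-- canonical per-element steps both ports reduce to (under Nodup keys)
def fC (aD : PySem.Dict String String) (d : PySem.Dict String String) (kv : String × String) : PySem.Dict String String :=
  if aD.contains kv.1 = false then d.insert kv.1 kv.2
  else if aD.getD kv.1 kv.2 ≠ kv.2 then d.insert kv.1 kv.2 else d

def gC (aD : PySem.Dict String String) (d : PySem.Dict String String) (kv : String × String) : PySem.Dict String String :=
  if aD.contains kv.1 = false then d
  else if aD.getD kv.1 kv.2 ≠ kv.2 then d.insert kv.1 (aD.getD kv.1 kv.2) else d

-- A's first-loop step, componentwise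
def fA (bD aD : PySem.Dict String String) (d : PySem.Dict String String) (kv : String × String) : PySem.Dict String String :=
  if aD.contains kv.1 = false then d.insert kv.1 kv.2
  else if aD.getD kv.1 kv.2 ≠ kv.2 then d.insert kv.1 (bD.getD kv.1 kv.2) else d

-- B's loop step, componentwise
def fB (bD aD : PySem.Dict String String) (d : PySem.Dict String String) (k : String) : PySem.Dict String String :=
  if aD.contains k = false then d.insert k (bD.getD k "")
  else if bD.contains k = false then d
  else if bD.getD k "" ≠ aD.getD k "" then d.insert k (bD.getD k "") else d

def gB (bD aD : PySem.Dict String String) (d : PySem.Dict String String) (k : String) : PySem.Dict String String :=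
  if aD.contains k = false then d
  else if bD.contains k = false then d.insert k (aD.getD k "")
  else if bD.getD k "" ≠ aD.getD k "" then d.insert k (aD.getD k "") else d

theorem contains_mk_iff (l : List (String × String)) (k : String) :
    (PySem.Dict.mk l).contains k = true ↔ k ∈ l.map Prod.fst := by
  simp [PySem.Dict.contains_mk, List.any_eq_true]

theorem contains_mk_eq (l : List (String × String)) (k : String) :
    (PySem.Dict.mk l).contains k = (l.map Prod.fst).contains k := by
  rw [Bool.eq_iff_iff]; simp [PySem.Dict.contains_mk, List.any_eq_true]

theorem contains_mk_of_mem {l : List (String × String)} {kv : String × String} (h : kv ∈ l) :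
    (PySem.Dict.mk l).contains kv.1 = true :=
  (contains_mk_iff l kv.1).2 (List.mem_map_of_mem h)

theorem getD_mk_of_mem {l : List (String × String)} {kv : String × String} (h : kv ∈ l)
    (hn : (l.map Prod.fst).Nodup) (d0 : String) : (PySem.Dict.mk l).getD kv.1 d0 = kv.2 := by
  have : ((kv.1, kv.2) : String × String) ∈ (PySem.Dict.mk l).items := by simpa using h
  exact PySem.Dict.getD_of_mem_items _ this (by simpa [PySem.Dict.keys_mk] using hn) d0

theorem getD_default_congr (d : PySem.Dict String String) (k : String)
    (h : d.contains k = true) (a b : String) : d.getD k a = d.getD k b := by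
  rw [PySem.Dict.getD_eq_get?_getD, PySem.Dict.getD_eq_get?_getD]
  rw [PySem.Dict.contains_eq_isSome_get?] at h
  cases hg : d.get? k with
  | none => rw [hg] at h; simp at h
  | some v => rfl

-- the merged dict {**before, **after} lists before's keys, then after's new keys
theorem keys_merged (before after : List (String × String)) (h2 : (after.map Prod.fst).Nodup) :
    (after.foldl (fun (d : PySem.Dict String String) kv => d.insert kv.1 kv.2) (PySem.Dict.mk before)).keys
    = before.map Prod.fst ++ (after.map Prod.fst).filter (fun k => decide ((PySem.Dict.mk before).contains k = false)) := by
  rw [PySem.Dict.keys_foldl_insert_key after Prod.fst (fun _ kv => kv.2)]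
  rw [PySem.Set.update_eq_append_filter, PySem.Set.ofList_eq_self_of_nodup _ h2]
  rw [PySem.Dict.keys_mk]
  congr 1
  apply List.filter_congr
  intro k _
  rw [contains_mk_eq]
  simp

theorem fB_before (before after : List (String × String)) (h1 : (before.map Prod.fst).Nodup)
    (init : PySem.Dict String String) :
    (before.map Prod.fst).foldl (fB (PySem.Dict.mk before) (PySem.Dict.mk after)) init
    = before.foldl (fC (PySem.Dict.mk after)) init := by
  rw [List.foldl_map]
  refine PySem.List.foldl_congr_mem' _ _ _ _ ?_
  intro kv hkv d
  have hbv := getD_mk_of_mem hkv h1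
  have hbc := contains_mk_of_mem hkv
  by_cases hc : (PySem.Dict.mk after).contains kv.1 = false
  · simp [fB, fC, hc, hbv]
  · have hct : (PySem.Dict.mk after).contains kv.1 = true := by
      cases h : (PySem.Dict.mk after).contains kv.1 <;> simp_all
    have hdd := getD_default_congr _ kv.1 hct "" kv.2
    simp only [fB, fC, hc, hbc, hbv, hdd, if_false, Bool.true_eq_false, ne_eq]
    by_cases hne : (PySem.Dict.mk after).getD kv.1 kv.2 = kv.2 <;>
      simp [hne, eq_comm] <;> (intro h; exact absurd h.symm hne)

theorem gB_before (before after : List (String × String)) (h1 : (before.map Prod.fst).Nodup)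
    (init : PySem.Dict String String) :
    (before.map Prod.fst).foldl (gB (PySem.Dict.mk before) (PySem.Dict.mk after)) init
    = before.foldl (gC (PySem.Dict.mk after)) init := by
  rw [List.foldl_map]
  refine PySem.List.foldl_congr_mem' _ _ _ _ ?_
  intro kv hkv d
  have hbv := getD_mk_of_mem hkv h1
  have hbc := contains_mk_of_mem hkv
  by_cases hc : (PySem.Dict.mk after).contains kv.1 = false
  · simp [gB, gC, hc]
  · have hct : (PySem.Dict.mk after).contains kv.1 = true := by
      cases h : (PySem.Dict.mk after).contains kv.1 <;> simp_all
    have hdd := getD_default_congr _ kv.1 hct "" kv.2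
    simp only [gB, gC, hc, hbc, hbv, hdd, if_false, Bool.true_eq_false, ne_eq]
    by_cases hne : (PySem.Dict.mk after).getD kv.1 kv.2 = kv.2 <;>
      simp [hne, eq_comm] <;> (intro h; exact absurd h.symm hne)

-- on after-only keys B leaves before_diff untouched
theorem fB_tail_id (before after : List (String × String)) (init : PySem.Dict String String) :
    ((after.map Prod.fst).filter (fun k => decide ((PySem.Dict.mk before).contains k = false))).foldl
      (fB (PySem.Dict.mk before) (PySem.Dict.mk after)) init = init := by
  rw [PySem.List.foldl_congr_mem' _ _ (fun acc _ => acc) _ ?_, PySem.List.foldl_ignore]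
  intro k hk d
  obtain ⟨hmem, hnb⟩ := List.mem_filter.1 hk
  have hac : (PySem.Dict.mk after).contains k = true := (contains_mk_iff _ _).2 hmem
  have hbc : (PySem.Dict.mk before).contains k = false := by simpa using hnb
  simp [fB, hac, hbc]

-- on after-only keys B's after_diff updates coincide with A's second loop
theorem gB_tail (before after : List (String × String)) (h2 : (after.map Prod.fst).Nodup)
    (init : PySem.Dict String String) :
    ((after.map Prod.fst).filter (fun k => decide ((PySem.Dict.mk before).contains k = false))).foldl
      (gB (PySem.Dict.mk before) (PySem.Dict.mk after)) init
    = after.foldl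
        (fun (d : PySem.Dict String String) kv =>
          if (PySem.Dict.mk before).contains kv.1 = false then d.insert kv.1 kv.2 else d)
        init := by
  rw [PySem.List.foldl_ite_eq_foldl_filter
        (p := fun kv : String × String => (PySem.Dict.mk before).contains kv.1 = false)
        (f := fun (d : PySem.Dict String String) kv => d.insert kv.1 kv.2)]
  rw [show ((after.map Prod.fst).filter (fun k => decide ((PySem.Dict.mk before).contains k = false)))
        = (after.filter (fun kv => decide ((PySem.Dict.mk before).contains kv.1 = false))).map Prod.fst
      from List.filter_map]
  rw [List.foldl_map]
  refine PySem.List.foldl_congr_mem' _ _ _ _ ?_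
  intro kv hkv d
  obtain ⟨hmem, hnb⟩ := List.mem_filter.1 hkv
  have hac : (PySem.Dict.mk after).contains kv.1 = true := contains_mk_of_mem hmem
  have hbc : (PySem.Dict.mk before).contains kv.1 = false := by simpa using hnb
  have hav := getD_mk_of_mem hmem h2 ""
  simp [gB, hac, hbc, hav]

-- A reduces to the canonical folds
theorem A_canonical (before after : List (String × String))
    (h1 : (before.map Prod.fst).Nodup) :
    state_diff_finder_py before after =
      ((before.foldl (fC (PySem.Dict.mk after)) (PySem.Dict.mk [])).items,
       (after.foldl
          (fun (d : PySem.Dict String String) kv =>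
            if (PySem.Dict.mk before).contains kv.1 = false then d.insert kv.1 kv.2 else d)
          (before.foldl (gC (PySem.Dict.mk after)) (PySem.Dict.mk []))).items) := by
  have hstep : (fun (p : PySem.Dict String String × PySem.Dict String String) kv =>
        if (PySem.Dict.mk after).contains kv.1 = false then (p.1.insert kv.1 kv.2, p.2)
        else if (PySem.Dict.mk after).getD kv.1 kv.2 ≠ kv.2 then
          (p.1.insert kv.1 ((PySem.Dict.mk before).getD kv.1 kv.2), p.2.insert kv.1 ((PySem.Dict.mk after).getD kv.1 kv.2))
        else p)
      = fun (s : PySem.Dict String String × PySem.Dict String String) e =>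
          (fA (PySem.Dict.mk before) (PySem.Dict.mk after) s.1 e, gC (PySem.Dict.mk after) s.2 e) := by
    funext s e; simp only [fA, gC]; split_ifs <;> rfl
  simp only [state_diff_finder_py]
  rw [hstep, PySem.List.foldl_prod_mk]
  have hfa : before.foldl (fA (PySem.Dict.mk before) (PySem.Dict.mk after)) (PySem.Dict.mk [])
      = before.foldl (fC (PySem.Dict.mk after)) (PySem.Dict.mk []) := by
    refine PySem.List.foldl_congr_mem' _ _ _ _ ?_
    intro kv hkv d
    simp only [fA, fC, getD_mk_of_mem hkv h1]
  rw [hfa]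

-- B reduces to the same canonical folds
theorem B_canonical (before after : List (String × String))
    (h1 : (before.map Prod.fst).Nodup) (h2 : (after.map Prod.fst).Nodup) :
    state_diff_finder_py_alt before after =
      ((before.foldl (fC (PySem.Dict.mk after)) (PySem.Dict.mk [])).items,
       (after.foldl
          (fun (d : PySem.Dict String String) kv =>
            if (PySem.Dict.mk before).contains kv.1 = false then d.insert kv.1 kv.2 else d)
          (before.foldl (gC (PySem.Dict.mk after)) (PySem.Dict.mk []))).items) := by
  have hstep : (fun (p : PySem.Dict String String × PySem.Dict String String) k =>
        if (PySem.Dict.mk after).contains k = false then (p.1.insert k ((PySem.Dict.mk before).getD k ""), p.2)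
        else if (PySem.Dict.mk before).contains k = false then (p.1, p.2.insert k ((PySem.Dict.mk after).getD k ""))
        else if (PySem.Dict.mk before).getD k "" ≠ (PySem.Dict.mk after).getD k "" then
          (p.1.insert k ((PySem.Dict.mk before).getD k ""), p.2.insert k ((PySem.Dict.mk after).getD k ""))
        else p)
      = fun (s : PySem.Dict String String × PySem.Dict String String) k =>
          (fB (PySem.Dict.mk before) (PySem.Dict.mk after) s.1 k,
           gB (PySem.Dict.mk before) (PySem.Dict.mk after) s.2 k) := by
    funext s k; simp only [fB, gB]; split_ifs <;> rfl
  simp only [state_diff_finder_py_alt]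
  rw [hstep, PySem.List.foldl_prod_mk, keys_merged before after h2,
      List.foldl_append, List.foldl_append]
  rw [fB_before before after h1, gB_before before after h1,
      fB_tail_id before after, gB_tail before after h2]

-- ===== VERDICT (by name: the statement is the Claim_ definition above) =====
theorem state_diff_finder_py_spec : Claim_equal_state_diff_finder_py := by
  intro before after _ hpre
  unfold Spec_state_diff_finder_py
  rw [A_canonical before after hpre.1, B_canonical before after hpre.1 hpre.2]
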